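-- pv_equiv track=rewrite | github.com/dahea-moon/TIL-SSAFY | Algorithm/20190904Practice/newcal.py | sharpc
-- ===== SOURCE A (Python) =====
-- def sharpc(x,y):
--     num = 0
--     for i in range(1, x+y):
--         if i == x+y-1:
--             for _ in range(x):
--                 num += 1
--         else:
--             for _ in range(i):
--                 num += 1
--     return num
-- ===== SOURCE B (Python) =====
-- def sharpc(x, y):
--     s = x + y
--     if s < 2:
--         return 0
--     return (s - 2) * (s - 1) // 2 + max(x, 0)
-- ===== Notes on version B (the rewrite author's own statement) =====
-- stated objective: faster
-- what changed: Replaced A's nested unit-increment loops (quadratic in x+y) by the closed-form arithmetic series (x+y-2)*(x+y-1)//2 + max(x,0), with 0 for x+y < 2.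
import Mathlib
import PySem

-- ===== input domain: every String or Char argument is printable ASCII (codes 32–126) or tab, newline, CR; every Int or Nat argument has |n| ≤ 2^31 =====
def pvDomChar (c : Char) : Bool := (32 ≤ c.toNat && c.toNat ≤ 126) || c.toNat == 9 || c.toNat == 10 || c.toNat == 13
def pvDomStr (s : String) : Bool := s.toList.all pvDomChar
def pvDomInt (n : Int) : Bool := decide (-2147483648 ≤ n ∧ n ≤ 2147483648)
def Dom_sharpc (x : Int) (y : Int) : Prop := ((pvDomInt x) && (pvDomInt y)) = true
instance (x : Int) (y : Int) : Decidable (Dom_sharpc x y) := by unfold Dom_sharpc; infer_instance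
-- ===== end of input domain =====

-- B replaces A's O((x+y)^2) nested counting loops by the O(1) closed-form arithmetic series (x+y-2)(x+y-1)//2 + max(x,0).

-- ===== PORT A =====
def sharpc (x : Int) (y : Int) : Int :=
  (PySem.List.pyRange 1 (x + y) 1).foldl
    (fun num i =>
      if i = x + y - 1 then
        (PySem.List.pyRange 0 x 1).foldl (fun n _ => n + 1) num
      else
        (PySem.List.pyRange 0 i 1).foldl (fun n _ => n + 1) num)
    0

-- ===== PORT B =====
def sharpc_alt (x : Int) (y : Int) : Int :=
  let s := x + y
  if s < 2 then 0
  else PySem.Int.floordiv ((s - 2) * (s - 1)) 2 + max x 0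

-- ===== PRECONDITION & SPEC =====
def Spec_sharpc (x : Int) (y : Int) (out : Int) : Prop := out = sharpc_alt x y
instance (x : Int) (y : Int) (out : Int) : Decidable (Spec_sharpc x y out) := by unfold Spec_sharpc; infer_instance

-- ===== CLAIM (what is proved, stated in full; the proofs are below) =====
def Claim_equal_sharpc : Prop := ∀ (x : Int) (y : Int), Dom_sharpc x y → Spec_sharpc x y (sharpc x y)

-- ===== LEMMAS AND PROOFS =====

-- 'num += 1' repeated once per element of a list adds its length
theorem pv_fold_count {α : Type} (l : List α) (n : Int) :
    l.foldl (fun n _ => n + 1) n = n + l.length := by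
  induction l generalizing n with
  | nil => simp
  | cons a t ih => simp [List.foldl, ih]; ring

-- the inner loop 'for _ in range(k): num += 1' adds max k 0
theorem pv_fold_inner (k : Int) (n : Int) :
    (PySem.List.pyRange 0 k 1).foldl (fun n _ => n + 1) n = n + max k 0 := by
  rw [pv_fold_count, PySem.List.length_pyRange_one]
  simp

-- sum of the range list 1..m-1 doubled is (m-2)(m-1) for m ≥ 2
theorem pv_two_sum_range (n : Nat) :
    2 * ((List.range n).map (fun (k : Nat) => (1 : Int) + (k : Int))).sum = n * (n + 1) := by
  induction n with
  | zero => simp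
  | succ m ih =>
    rw [List.range_succ, List.map_append, List.sum_append]
    simp only [List.map_cons, List.map_nil, List.sum_cons, List.sum_nil]
    push_cast at ih ⊢
    nlinarith [ih]

theorem sharpc_spec : Claim_equal_sharpc := by
  unfold Claim_equal_sharpc Spec_sharpc sharpc sharpc_alt
  intro x y _
  by_cases h : x + y < 2
  · simp only [if_pos h]
    rw [show PySem.List.pyRange 1 (x + y) 1 = [] from PySem.List.pyRange_one_eq_nil (by omega)]
    simp
  · push_neg at h
    simp only [if_neg (by omega : ¬ x + y < 2)]
    have hsplit : PySem.List.pyRange 1 (x + y) 1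
        = PySem.List.pyRange 1 (x + y - 1) 1 ++ [x + y - 1] := by
      have h2 : PySem.List.pyRange 1 (x + y - 1 + 1) 1
          = PySem.List.pyRange 1 (x + y - 1) 1 ++ [x + y - 1] :=
        PySem.List.pyRange_one_succ_right (by omega)
      rw [show x + y - 1 + 1 = x + y by ring] at h2
      exact h2
    rw [hsplit, List.foldl_append]
    -- the last iteration takes the i == x+y-1 branch
    simp only [List.foldl_cons, List.foldl_nil, if_true]
    rw [pv_fold_inner]
    -- all earlier iterations take the else branch and add i
    rw [PySem.List.foldl_congr_mem
        (g := fun (num i : Int) => num + i)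
        (h := by
          intro acc i hi
          rw [PySem.List.mem_pyRange_one] at hi
          rw [if_neg (by omega), pv_fold_inner]
          show acc + max i 0 = acc + i
          omega)]
    rw [show (fun (num i : Int) => num + i)
          = (fun (acc : Int) (z : Int) => acc + (fun i : Int => i) z) from rfl,
        PySem.List.foldl_add (g := fun i : Int => i),
        List.map_id', PySem.List.pyRange_one]
    have h2 := pv_two_sum_range ((x + y - 1 - 1).toNat)
    have hfd : PySem.Int.floordiv ((x + y - 2) * (x + y - 1)) 2
        = ((List.range (x + y - 1 - 1).toNat).map (fun (k : Nat) => (1 : Int) + (k : Int))).sum := by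
      have hmul : (x + y - 2) * (x + y - 1)
          = 2 * ((List.range (x + y - 1 - 1).toNat).map (fun (k : Nat) => (1 : Int) + (k : Int))).sum := by
        rw [h2]; nlinarith [Int.toNat_of_nonneg (show (0:Int) ≤ x + y - 1 - 1 by omega)]
      rw [hmul]
      simp [PySem.Int.floordiv, Int.mul_fdiv_cancel_left _ (by norm_num : (2:Int) ≠ 0)]
    rw [hfd]
    ring

-- ===== VERDICT (by name: the statement is the Claim_ definition above) =====
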